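-- pv_equiv track=rewrite | github.com/iandees/node-drag-watcher | notifiers/slack.py | _format_drag_text
-- ===== SOURCE A (Python) =====
-- def _format_drag_text(drags: list[dict], changeset: str, user: str) -> str:
--     """Format the mrkdwn text for a changeset drag alert."""
--     by_node: dict[str, list[dict]] = {}
--     for drag in drags:
--         by_node.setdefault(drag["node_id"], []).append(drag)
--
--     lines = [
--         f":warning: Possible node drag in "
--         f"<https://osmcha.org/changesets/{changeset}|changeset {changeset}> "
--         f"by {user}",
--     ]
--
--     for node_id, node_drags in by_node.items():
--         distance = node_drags[0]["distance_meters"]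
--         node_link = f"<https://www.openstreetmap.org/node/{node_id}|{node_id}>"
--
--         way_labels = []
--         for d in node_drags:
--             label = f"<https://www.openstreetmap.org/way/{d['way_id']}|{d['way_id']}>"
--             if d["way_name"]:
--                 label += f" ({d['way_name']})"
--             way_labels.append(label)
--
--         ways_str = ", ".join(way_labels)
--         lines.append(
--             f"• Node {node_link} moved {distance}m — "
--             f"affects way{'s' if len(node_drags) > 1 else ''} {ways_str}"
--         )
--
--     return "\n".join(lines)
-- ===== SOURCE B (Python) =====
-- def _format_drag_text(drags: list[dict], changeset: str, user: str) -> str: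
--     """Format the mrkdwn text for a changeset drag alert (dict-free: distinct
--     node ids in first-seen order, then a filter scan per node)."""
--     order = []
--     for d in drags:
--         if d["node_id"] not in order:
--             order.append(d["node_id"])
--
--     def bullet(nid):
--         mine = [d for d in drags if d["node_id"] == nid]
--         labels = [
--             f"<https://www.openstreetmap.org/way/{d['way_id']}|{d['way_id']}>"
--             + (f" ({d['way_name']})" if d["way_name"] else "")
--             for d in mine
--         ]
--         return (
--             f"• Node <https://www.openstreetmap.org/node/{nid}|{nid}> "
--             f"moved {mine[0]['distance_meters']}m — "
--             f"affects way{'s' if len(mine) > 1 else ''} " + ", ".join(labels)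
--         )
--
--     header = (
--         f":warning: Possible node drag in "
--         f"<https://osmcha.org/changesets/{changeset}|changeset {changeset}> "
--         f"by {user}"
--     )
--     return "\n".join([header] + [bullet(nid) for nid in order])
-- ===== Notes on version B (the rewrite author's own statement) =====
-- stated objective: alternative
-- what changed: Drops A's grouping dict entirely: B collects the distinct node ids in first-seen order into a plain list, then for each distinct id re-scans drags with a filter comprehension to build that node's labels and read the first drag's distance, trading A's O(n) hash grouping for dict-free nested scans.
import Mathlib
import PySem

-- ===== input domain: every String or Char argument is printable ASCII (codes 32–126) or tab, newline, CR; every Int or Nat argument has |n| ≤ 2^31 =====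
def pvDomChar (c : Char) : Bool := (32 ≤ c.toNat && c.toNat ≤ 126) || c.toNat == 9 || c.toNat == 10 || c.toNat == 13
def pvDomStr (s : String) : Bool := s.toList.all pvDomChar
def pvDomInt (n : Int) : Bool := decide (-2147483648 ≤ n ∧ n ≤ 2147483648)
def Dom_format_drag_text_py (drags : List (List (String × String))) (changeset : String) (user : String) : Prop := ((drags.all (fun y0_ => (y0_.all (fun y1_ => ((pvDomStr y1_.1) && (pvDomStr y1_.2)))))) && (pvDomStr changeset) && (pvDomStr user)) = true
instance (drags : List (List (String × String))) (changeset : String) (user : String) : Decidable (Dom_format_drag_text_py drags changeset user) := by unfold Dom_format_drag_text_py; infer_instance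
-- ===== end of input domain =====

-- B drops A's grouping dict: it collects distinct node ids in first-seen order, then builds
-- each bullet by a filter scan over drags; same output (objective: alternative).


-- shared dict primitive: drag["k"] (first match in the association list; junk "" outside Pre_)
def pvGetS (g : List (String × String)) (k : String) : String :=
  ((g.find? (fun p => p.1 == k)).map (fun p => p.2)).getD ""

-- ===== PORT A =====
def format_drag_text_py (drags : List (List (String × String))) (changeset : String) (user : String) : String :=
  let by_node : PySem.Dict String (List (List (String × String))) :=
    drags.foldl (fun d g => d.modify (pvGetS g "node_id") [] (fun x => x ++ [g])) PySem.Dict.empty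
  let lines : List String :=
    [":warning: Possible node drag in <https://osmcha.org/changesets/" ++ changeset
      ++ "|changeset " ++ changeset ++ "> by " ++ user]
  let lines := by_node.items.foldl (fun ls p =>
    let node_id := p.1
    let node_drags := p.2
    let distance := pvGetS (PySem.List.pyGetD node_drags 0 []) "distance_meters"
    let node_link := "<https://www.openstreetmap.org/node/" ++ node_id ++ "|" ++ node_id ++ ">"
    let way_labels := node_drags.foldl (fun acc g =>
      acc ++ [let label := "<https://www.openstreetmap.org/way/" ++ pvGetS g "way_id" ++ "|" ++ pvGetS g "way_id" ++ ">"
              if pvGetS g "way_name" ≠ "" then label ++ " (" ++ pvGetS g "way_name" ++ ")" else label]) []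
    let ways_str := PySem.Str.join ", " way_labels
    ls ++ ["• Node " ++ node_link ++ " moved " ++ distance ++ "m — affects way"
            ++ (if node_drags.length > 1 then "s" else "") ++ " " ++ ways_str]) lines
  PySem.Str.join "\n" lines

-- ===== PORT B =====
-- B-side helper: the bullet line for one distinct node id (a filter scan over all drags)
def pvBullet (drags : List (List (String × String))) (nid : String) : String :=
  let mine := drags.filter (fun d => pvGetS d "node_id" == nid)
  let labels := mine.map (fun d =>
    "<https://www.openstreetmap.org/way/" ++ pvGetS d "way_id" ++ "|" ++ pvGetS d "way_id" ++ ">"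
      ++ (if pvGetS d "way_name" ≠ "" then " (" ++ pvGetS d "way_name" ++ ")" else ""))
  "• Node <https://www.openstreetmap.org/node/" ++ nid ++ "|" ++ nid ++ "> moved "
    ++ pvGetS (PySem.List.pyGetD mine 0 []) "distance_meters" ++ "m — affects way"
    ++ (if mine.length > 1 then "s" else "") ++ " " ++ PySem.Str.join ", " labels

def format_drag_text_py_alt (drags : List (List (String × String))) (changeset : String) (user : String) : String :=
  let order : PySem.Set String :=
    drags.foldl (fun s g => PySem.Set.add s (pvGetS g "node_id")) PySem.Set.empty
  let header : String :=
    ":warning: Possible node drag in <https://osmcha.org/changesets/" ++ changeset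
      ++ "|changeset " ++ changeset ++ "> by " ++ user
  PySem.Str.join "\n" ([header] ++ order.map (pvBullet drags))

-- ===== PRECONDITION & SPEC =====
def pvHasKey (g : List (String × String)) (k : String) : Bool := g.any (fun p => p.1 == k)

-- exactly the inputs where the Python A returns: every drag has the keys "node_id", "way_id",
-- "way_name", and every drag that is the FIRST with its node_id also has "distance_meters"
def Pre_format_drag_text_py (drags : List (List (String × String))) (changeset : String) (user : String) : Prop :=
  ∀ i, (h : i < drags.length) →
    pvHasKey drags[i] "node_id" = true ∧ pvHasKey drags[i] "way_id" = true ∧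
    pvHasKey drags[i] "way_name" = true ∧
    ((∀ j, (hj : j < i) → pvGetS drags[j] "node_id" ≠ pvGetS drags[i] "node_id") →
      pvHasKey drags[i] "distance_meters" = true)
instance (drags : List (List (String × String))) (changeset : String) (user : String) : Decidable (Pre_format_drag_text_py drags changeset user) := by unfold Pre_format_drag_text_py; infer_instance

def pvWitness_format_drag_text_py : (List (List (String × String))) × String × String :=
  ([[("node_id", "101"), ("distance_meters", "12"), ("way_id", "7"), ("way_name", "Main St")],
    [("node_id", "101"), ("way_id", "8"), ("way_name", "")]], "555", "alice")

def Spec_format_drag_text_py (drags : List (List (String × String))) (changeset : String) (user : String) (out : String) : Prop := out = format_drag_text_py_alt drags changeset user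
instance (drags : List (List (String × String))) (changeset : String) (user : String) (out : String) : Decidable (Spec_format_drag_text_py drags changeset user out) := by unfold Spec_format_drag_text_py; infer_instance

-- ===== CLAIM (what is proved, stated in full; the proofs are below) =====
def Claim_equal_format_drag_text_py : Prop := ∀ (drags : List (List (String × String))) (changeset : String) (user : String), Dom_format_drag_text_py drags changeset user → Pre_format_drag_text_py drags changeset user → Spec_format_drag_text_py drags changeset user (format_drag_text_py drags changeset user)

-- ===== LEMMAS AND PROOFS =====

-- A's grouping dict: value at k is the sublist of drags whose node_id is k
theorem pvGetA (l : List (List (String × String))) (k : String) :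
    (l.foldl (fun d g => d.modify (pvGetS g "node_id") [] (fun x => x ++ [g])) PySem.Dict.empty).getD k []
      = l.filter (fun g => pvGetS g "node_id" == k) := by
  have h := PySem.Dict.getD_foldl_modify_append (l.map (fun g => (pvGetS g "node_id", g)))
    (PySem.Dict.empty) k
  rw [List.foldl_map] at h
  simpa [List.filter_map, Function.comp_def] using h

-- ===== VERDICT (by name: the statement is the Claim_ definition above) =====
theorem format_drag_text_py_spec : Claim_equal_format_drag_text_py := by
  intro drags changeset user _ _
  unfold Spec_format_drag_text_py format_drag_text_py format_drag_text_py_alt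
  simp only [PySem.List.foldl_append_singleton_eq_map]
  set dA := drags.foldl (fun d g => d.modify (pvGetS g "node_id") [] (fun x => x ++ [g])) PySem.Dict.empty with hdA
  have hkA : dA.keys = PySem.Set.update [] (drags.map (fun g => pvGetS g "node_id")) := by
    rw [hdA]
    exact PySem.Dict.keys_foldl_modify_key drags (fun g => pvGetS g "node_id") []
      (fun _ g => (fun x => x ++ [g])) PySem.Dict.empty
  have hndA : dA.keys.Nodup := by
    rw [hdA]
    exact PySem.Dict.nodup_keys_foldl_modify_key drags (fun g => pvGetS g "node_id") []
      (fun _ g => (fun x => x ++ [g])) PySem.Dict.empty PySem.Dict.nodup_keys_empty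
  have horder : drags.foldl (fun s g => PySem.Set.add s (pvGetS g "node_id")) PySem.Set.empty
      = PySem.Set.update [] (drags.map (fun g => pvGetS g "node_id")) := by
    rw [show PySem.Set.update [] (drags.map (fun g => pvGetS g "node_id"))
        = (drags.map (fun g => pvGetS g "node_id")).foldl PySem.Set.add [] from rfl,
      List.foldl_map]
    rfl
  rw [PySem.Dict.items_eq_map_keys dA hndA [], hkA, horder]
  congr 1
  congr 1
  rw [List.map_map]
  apply List.map_congr_left
  intro k hk
  have hkmem : k ∈ drags.map (fun g => pvGetS g "node_id") := by
    rw [show PySem.Set.update [] (drags.map (fun g => pvGetS g "node_id"))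
        = PySem.Set.ofList (drags.map (fun g => pvGetS g "node_id")) from rfl] at hk
    exact (PySem.Set.mem_ofList _ _).1 hk
  obtain ⟨g, hg, hgk⟩ := List.mem_map.1 hkmem
  have hmne : drags.filter (fun g => pvGetS g "node_id" == k) ≠ [] := by
    intro he
    have : g ∈ drags.filter (fun g => pvGetS g "node_id" == k) := by
      rw [List.mem_filter]; exact ⟨hg, by simp [hgk]⟩
    simp [he] at this
  obtain ⟨g0, t, hm⟩ := List.exists_cons_of_ne_nil hmne
  have hA : dA.getD k [] = g0 :: t := by rw [hdA, pvGetA, hm]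
  have hlab : ∀ x : List (String × String),
      ("<https://www.openstreetmap.org/way/" ++ pvGetS x "way_id" ++ "|" ++ pvGetS x "way_id" ++ ">"
        ++ (if pvGetS x "way_name" ≠ "" then " (" ++ pvGetS x "way_name" ++ ")" else ""))
      = (if pvGetS x "way_name" ≠ "" then
          "<https://www.openstreetmap.org/way/" ++ pvGetS x "way_id" ++ "|" ++ pvGetS x "way_id" ++ ">"
            ++ " (" ++ pvGetS x "way_name" ++ ")"
        else "<https://www.openstreetmap.org/way/" ++ pvGetS x "way_id" ++ "|" ++ pvGetS x "way_id" ++ ">") := by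
    intro x; split_ifs with h
    · simp [← String.toList_inj, String.toList_append]
    · simp
  simp only [Function.comp, hA, pvBullet, hm, hlab]
  simp only [List.nil_append, PySem.List.pyGetD_zero_cons, List.length_cons]
  simp only [← String.toList_inj, String.toList_append]
  simp [Function.comp_def]
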